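-- pv_equiv track=rewrite | github.com/Shruteek/Optimized-sgRNA-Design | code/GenomeTools.py | isValidRNA
-- ===== SOURCE A (Python) =====
-- def isValidRNA(RNASequence):
--     """Method that returns a boolean representing whether the input sequence is a valid RNA sequence."""
--     if not isinstance(RNASequence, str):
--         return False
--     validRNABasePairs = "ACUG"
--     for nucleotide in RNASequence:
--         if not validRNABasePairs.__contains__(nucleotide):
--             return False
--     return True
-- ===== SOURCE B (Python) =====
-- def isValidRNA(RNASequence):
--     """Counting characterization: the sequence is valid RNA iff the occurrences of
--     the four RNA bases together account for every character of the string."""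
--     if not isinstance(RNASequence, str):
--         return False
--     return (RNASequence.count("A") + RNASequence.count("C")
--             + RNASequence.count("U") + RNASequence.count("G")) == len(RNASequence)
-- ===== Notes on version B (the rewrite author's own statement) =====
-- stated objective: alternative
-- what changed: Replaced the short-circuiting per-character membership scan with an arithmetic characterization: the string is valid iff the occurrence counts of the four RNA bases sum to its length, computed by four str.count passes and one comparison, with no per-character branch or early exit.
import Mathlib
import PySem

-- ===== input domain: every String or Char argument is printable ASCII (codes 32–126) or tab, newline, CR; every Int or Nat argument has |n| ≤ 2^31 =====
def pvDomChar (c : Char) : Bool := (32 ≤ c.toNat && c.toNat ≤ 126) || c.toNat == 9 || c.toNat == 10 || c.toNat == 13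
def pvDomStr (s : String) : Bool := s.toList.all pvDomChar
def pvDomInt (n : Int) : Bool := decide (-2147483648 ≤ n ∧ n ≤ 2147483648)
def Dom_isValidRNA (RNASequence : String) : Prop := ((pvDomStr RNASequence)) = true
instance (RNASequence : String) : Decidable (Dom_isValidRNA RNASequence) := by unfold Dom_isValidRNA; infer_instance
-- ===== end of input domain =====

-- B replaces A's short-circuiting membership scan by an arithmetic counting characterization
-- (count('A')+count('C')+count('U')+count('G') == len); alternative decomposition, same asymptotic cost.


-- ===== PORT A =====
-- for-loop with early return: scan the characters, returning False at the first non-ACUG one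
def isValidRNA_go (validRNABasePairs : List Char) : List Char → Bool
  | [] => true
  | nucleotide :: rest =>
    if !(validRNABasePairs.contains nucleotide) then false
    else isValidRNA_go validRNABasePairs rest

def isValidRNA (RNASequence : String) : Bool :=
  isValidRNA_go "ACUG".toList RNASequence.toList

-- ===== PORT B =====
-- four str.count passes summed, compared with len(RNASequence)
def isValidRNA_alt (RNASequence : String) : Bool :=
  ((PySem.Str.count RNASequence "A" + PySem.Str.count RNASequence "C"
    + PySem.Str.count RNASequence "U" + PySem.Str.count RNASequence "G" : Int)
   == PySem.Str.len RNASequence)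

-- ===== PRECONDITION & SPEC =====
def Spec_isValidRNA (RNASequence : String) (out : Bool) : Prop := out = isValidRNA_alt RNASequence
instance (RNASequence : String) (out : Bool) : Decidable (Spec_isValidRNA RNASequence out) := by unfold Spec_isValidRNA; infer_instance

-- ===== CLAIM (what is proved, stated in full; the proofs are below) =====
def Claim_equal_isValidRNA : Prop := ∀ (RNASequence : String), Dom_isValidRNA RNASequence → Spec_isValidRNA RNASequence (isValidRNA RNASequence)

-- ===== LEMMAS AND PROOFS =====
theorem isValidRNA_go_eq_all (t l : List Char) :
    isValidRNA_go t l = l.all (fun c => t.contains c) := by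
  induction l with
  | nil => rfl
  | cons c rest ih =>
    simp only [isValidRNA_go, ih, List.all_cons]
    cases hc : t.contains c <;> simp_all

-- Chars.count with a single-character pattern is List.count
theorem count_go_single (c : Char) :
    ∀ (l : List Char) (fuel acc : Nat), l.length ≤ fuel →
      PySem.Chars.count.go [c] fuel l acc = acc + l.count c := by
  intro l
  induction l with
  | nil => intro fuel acc _; cases fuel <;> simp [PySem.Chars.count.go]
  | cons d t ih =>
    intro fuel acc h
    cases fuel with
    | zero => simp at h
    | succ n =>
      simp only [PySem.Chars.count.go]
      by_cases hd : d = c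
      · subst hd
        have hpre : List.isPrefixOf [d] (d :: t) = true := by simp [List.isPrefixOf]
        simp only [hpre, if_pos, List.length_cons, List.length_nil, List.drop_succ_cons,
          List.drop_zero]
        rw [ih n (acc + 1) (by simpa using h)]
        simp
        omega
      · have hpre : List.isPrefixOf [c] (d :: t) = false := by
          simp [List.isPrefixOf]
          intro h'; exact absurd h'.symm hd
        rw [hpre]
        simp only [Bool.false_eq_true, if_false]
        rw [ih n acc (by simpa using h)]
        simp [hd]

theorem chars_count_single (s : List Char) (c : Char) :
    PySem.Chars.count s [c] = s.count c := by
  simp [PySem.Chars.count, count_go_single c s s.length 0 le_rfl]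

theorem sum_counts_eq_countP (l : List Char) :
    l.count 'A' + l.count 'C' + l.count 'U' + l.count 'G'
      = l.countP (fun c => "ACUG".toList.contains c) := by
  induction l with
  | nil => simp
  | cons d t ih =>
    simp only [List.count_cons, List.countP_cons]
    by_cases hA : d = 'A' <;> by_cases hC : d = 'C' <;> by_cases hU : d = 'U' <;>
      by_cases hG : d = 'G' <;> subst_vars <;> simp_all <;> omega

theorem key_iff (l : List Char) :
    (l.count 'A' + l.count 'C' + l.count 'U' + l.count 'G' = l.length)
      ↔ l.all (fun c => "ACUG".toList.contains c) = true := by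
  rw [sum_counts_eq_countP, List.all_eq_true, List.countP_eq_length]

-- ===== VERDICT (by name: the statement is the Claim_ definition above) =====
theorem isValidRNA_spec : Claim_equal_isValidRNA := by
  intro s _
  unfold Spec_isValidRNA isValidRNA isValidRNA_alt
  rw [isValidRNA_go_eq_all]
  simp only [PySem.Str.count_eq, PySem.Str.len_eq]
  have hA : ("A" : String).toList = ['A'] := rfl
  have hC : ("C" : String).toList = ['C'] := rfl
  have hU : ("U" : String).toList = ['U'] := rfl
  have hG : ("G" : String).toList = ['G'] := rfl
  rw [hA, hC, hU, hG, chars_count_single, chars_count_single, chars_count_single,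
    chars_count_single]
  have hkey := key_iff s.toList
  by_cases hall : (s.toList.all fun c => "ACUG".toList.contains c) = true
  · have h3 : (↑(s.toList.count 'A') + ↑(s.toList.count 'C') + ↑(s.toList.count 'U')
        + ↑(s.toList.count 'G') : Int) = (s.toList.length : Int) := by
      exact_mod_cast hkey.mpr hall
    rw [hall, h3]
    exact (beq_self_eq_true _).symm
  · simp only [Bool.not_eq_true] at hall
    rw [hall]
    symm
    simp only [beq_eq_false_iff_ne, ne_eq]
    intro he
    have hsum : s.toList.count 'A' + s.toList.count 'C' + s.toList.count 'U' + s.toList.count 'G'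
        = s.toList.length := by exact_mod_cast he
    rw [hkey.mp hsum] at hall
    simp at hall
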